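-- pv_equiv track=rewrite | github.com/d1sd41n/holbertonschool-machine_learning | supervised_learning/0x10-nlp_metrics/1-ngram_bleu.py | n_g_t
-- ===== SOURCE A (Python) =====
-- def n_g_t(corpus, n):
--     """[summary]
--
--     Args:
--         corpus ([type]): [description]
--         n ([type]): [description]
--
--     Returns:
--         [type]: [description]
--     """
--     aut_n = 0
--
--     if type(corpus[0]) is not list:
--         corpus = [corpus]
--         aut_n = 1
--
--     t_c = []
--
--     for line in corpus:
--
--         f_s = []
--         for x in range(len(line) - n + 1):
--             str_gram = ""
--
--             for i in range(n):
--                 if i != 0: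
--                     str_gram += " "
--                 str_gram += line[x + i]
--             f_s.append(str_gram)
--
--         t_c.append(f_s)
--
--     if aut_n:
--         return t_c[0]
--
--     return t_c
-- ===== SOURCE B (Python) =====
-- def _grams(line, n):
--     if n > len(line):
--         return []
--     return [" ".join(t) for t in zip(*(line[i:] for i in range(n)))]
--
--
-- def n_g_t(corpus, n):
--     """n-grams per line via the zip-of-shifted-slices idiom."""
--     aut_n = 0
--     if type(corpus[0]) is not list:
--         corpus = [corpus]
--         aut_n = 1
--     t_c = [_grams(line, n) for line in corpus]
--     return t_c[0] if aut_n else t_c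
-- ===== Notes on version B (the rewrite author's own statement) =====
-- stated objective: idiomatic
-- what changed: The per-line index loop with an inner string-concatenation loop is replaced by the standard zip-of-shifted-slices idiom: n shifted slices are zipped into tuples of consecutive words and each tuple is ' '.join-ed (with an early [] when n exceeds the line length).
-- outside the precondition, e.g. on n_g_t([['a']], 0): A returns [['', '']], B returns [[]]; on n_g_t([['a', 'b']], -1): A returns [['', '', '', '']], B returns [[]]; on n_g_t([], 2): A raises IndexError, B raises IndexError
import Mathlib
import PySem

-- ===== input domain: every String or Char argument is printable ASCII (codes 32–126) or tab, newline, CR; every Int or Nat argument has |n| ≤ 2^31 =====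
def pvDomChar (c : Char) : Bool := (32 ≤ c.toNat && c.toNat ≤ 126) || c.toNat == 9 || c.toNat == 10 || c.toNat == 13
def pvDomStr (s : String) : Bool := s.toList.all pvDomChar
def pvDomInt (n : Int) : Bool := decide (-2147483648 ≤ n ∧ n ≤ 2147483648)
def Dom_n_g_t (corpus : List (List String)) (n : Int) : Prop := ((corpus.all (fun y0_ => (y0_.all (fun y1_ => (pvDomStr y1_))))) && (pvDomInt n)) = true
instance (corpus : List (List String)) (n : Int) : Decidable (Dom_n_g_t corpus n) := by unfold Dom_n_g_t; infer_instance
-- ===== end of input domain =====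

-- B both ports: under the type convention corpus : List (List String), so Python's
-- `type(corpus[0]) is not list` is always False; its only effect is the IndexError on an
-- empty corpus, which Pre_n_g_t excludes.

-- ===== PORT A =====
-- A: for each line, for x in range(len(line)-n+1) build str_gram by the inner
-- `for i in range(n)` concatenation loop; lists grown by append (foldl ++ [·]).
def n_g_t (corpus : List (List String)) (n : Int) : List (List String) :=
  corpus.foldl (fun t_c line =>
    t_c ++ [(PySem.List.pyRange 0 ((line.length : Int) - n + 1) 1).foldl (fun f_s x =>
      f_s ++ [(PySem.List.pyRange 0 n 1).foldl (fun str_gram i =>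
        (if i ≠ 0 then str_gram ++ " " else str_gram) ++ PySem.List.pyGetD line (x + i) "") ""]) []]) []

-- ===== PORT B =====
-- B-side helpers: zip(*iters) — pvHeadsTails splits every list into head/tail (none when
-- one is exhausted), pvZipGo/pvZip produce the list of tuples.
def pvHeadsTails {α : Type} : List (List α) → Option (List α × List (List α))
  | [] => some ([], [])
  | [] :: _ => none
  | (a :: as) :: rest => (pvHeadsTails rest).map (fun p => (a :: p.1, as :: p.2))

def pvZipGo {α : Type} : List α → List (List α) → List (List α)
  | [], _ => []
  | a :: as, rest =>
    match pvHeadsTails rest with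
    | none => []
    | some (hs, ts) => (a :: hs) :: pvZipGo as ts

def pvZip {α : Type} : List (List α) → List (List α)
  | [] => []
  | l :: rest => pvZipGo l rest

-- B: per line, no n-grams when n exceeds the line length; otherwise zip the n shifted
-- slices line[i:] and " ".join each tuple.
def pvGrams (line : List String) (n : Int) : List String :=
  if (line.length : Int) < n then []
  else
    (pvZip ((PySem.List.pyRange 0 n 1).map (fun i => PySem.List.slice line (some i) none))).map
      (fun t => PySem.Str.join " " t)

def n_g_t_alt (corpus : List (List String)) (n : Int) : List (List String) :=
  corpus.map (fun line => pvGrams line n)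

-- ===== PRECONDITION & SPEC =====
-- Pre_ excludes the empty corpus, on which A raises IndexError at `corpus[0]`, and n <= 0,
-- a meaningless n-gram size no caller would specify, where A's per-line value
-- (len(line)-n+1 empty strings left over from its never-entered inner loop) and B's
-- (no n-grams) are both accidental answers to an unspecified corner.
def Pre_n_g_t (corpus : List (List String)) (n : Int) : Prop := corpus ≠ [] ∧ 1 ≤ n
instance (corpus : List (List String)) (n : Int) : Decidable (Pre_n_g_t corpus n) := by
  unfold Pre_n_g_t; infer_instance
def pvWitness_n_g_t : List (List String) × Int := ([["ab", "c"]], 1)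

def Spec_n_g_t (corpus : List (List String)) (n : Int) (out : List (List String)) : Prop :=
  out = n_g_t_alt corpus n
instance (corpus : List (List String)) (n : Int) (out : List (List String)) : Decidable (Spec_n_g_t corpus n out) := by
  unfold Spec_n_g_t; infer_instance


-- ===== CLAIM (what is proved, stated in full; the proofs are below) =====
def Claim_equal_n_g_t : Prop := ∀ (corpus : List (List String)) (n : Int), Dom_n_g_t corpus n → Pre_n_g_t corpus n → Spec_n_g_t corpus n (n_g_t corpus n)



-- ===== LEMMAS AND PROOFS =====

-- " ".join facts (via PySem.Chars.join)
theorem my_join_app (sep z : List Char) : ∀ (css : List (List Char)) (c : List Char),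
    PySem.Chars.join sep ((c :: css) ++ [z]) = PySem.Chars.join sep (c :: css) ++ sep ++ z := by
  intro css
  induction css with
  | nil => intro c; simp [PySem.Chars.join_cons_cons, PySem.Chars.join_singleton]
  | cons d ds ih =>
      intro c
      simp only [List.cons_append, PySem.Chars.join_cons_cons]
      rw [← List.cons_append, ih d]
      simp [List.append_assoc]

theorem sjoin_single (s : String) : PySem.Str.join " " [s] = s := by
  simp [PySem.Str.join, PySem.Chars.join_singleton, String.ofList_toList]

theorem sjoin_app (ys : List String) (hne : ys ≠ []) (z : String) :
    PySem.Str.join " " (ys ++ [z]) = PySem.Str.join " " ys ++ " " ++ z := by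
  obtain ⟨y, ys', rfl⟩ := List.exists_cons_of_ne_nil hne
  simp only [PySem.Str.join, List.map_append, List.map_cons, List.map_nil]
  rw [my_join_app]
  rw [String.ofList_append, String.ofList_append, String.ofList_toList, String.ofList_toList]

-- pvHeadsTails / pvZipGo definitional equations
theorem heads_nil {α : Type} : pvHeadsTails ([] : List (List α)) = some ([], []) := rfl
theorem heads_cons {α : Type} (a : α) (as : List α) (rest : List (List α)) :
    pvHeadsTails ((a :: as) :: rest) = (pvHeadsTails rest).map (fun p => (a :: p.1, as :: p.2)) := rfl
theorem zipGo_some {α : Type} (a : α) (as : List α) (rest : List (List α))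
    (hs : List α) (ts : List (List α)) (h : pvHeadsTails rest = some (hs, ts)) :
    pvZipGo (a :: as) rest = (a :: hs) :: pvZipGo as ts := by
  simp [pvZipGo, h]
theorem zipGo_none {α : Type} (a : α) (as : List α) (rest : List (List α))
    (h : pvHeadsTails rest = none) : pvZipGo (a :: as) rest = [] := by
  simp [pvZipGo, h]

-- zip(*(line[i:] for i in range(n))) characterised as the list of index windows
theorem my_headsTails {α : Type} (d : α) : ∀ (m : ℕ) (as : List α),
    pvHeadsTails ((List.range m).map (fun i => as.drop i)) =
      if m ≤ as.length then
        some ((List.range m).map (fun i => as.getD i d), (List.range m).map (fun i => as.drop (i+1)))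
      else none := by
  intro m
  induction m with
  | zero => intro as; simp [heads_nil]
  | succ m ih =>
      intro as
      conv_lhs => rw [List.range_succ_eq_map]
      cases as with
      | nil => simp [pvHeadsTails]
      | cons a as' =>
          simp only [List.map_cons, List.drop_zero, List.map_map]
          have hrest : (List.range m).map ((fun i => (a :: as').drop i) ∘ Nat.succ)
              = (List.range m).map (fun i => as'.drop i) := by
            apply List.map_congr_left; intro i _; simp [Function.comp]
          rw [heads_cons, hrest, ih as']
          by_cases h : m ≤ as'.length
          · rw [if_pos h, if_pos (by simp only [List.length_cons]; omega)]
            simp only [Option.map_some]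
            refine congrArg some (Prod.ext ?_ ?_)
            · conv_rhs => rw [List.range_succ_eq_map]
              simp [List.map_map, Function.comp]
            · conv_rhs => rw [List.range_succ_eq_map]
              simp [List.map_map, Function.comp]
          · rw [if_neg h, if_neg (by simp only [List.length_cons]; omega)]
            rfl

theorem my_zipGo {α : Type} (d : α) : ∀ (l : List α) (m : ℕ),
    pvZipGo l ((List.range m).map (fun i => l.drop (i+1))) =
      (List.range (l.length - m)).map (fun x => (List.range (m+1)).map (fun i => l.getD (x+i) d)) := by
  intro l
  induction l with
  | nil => intro m; simp [pvZipGo]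
  | cons a as ih =>
      intro m
      have hrest : (List.range m).map (fun i => (a :: as).drop (i+1))
          = (List.range m).map (fun i => as.drop i) := by
        apply List.map_congr_left; intro i _; simp
      rw [hrest]
      by_cases h : m ≤ as.length
      · rw [zipGo_some a as _ _ _ (by rw [my_headsTails d m as, if_pos h]), ih m]
        have hlen : (a :: as).length - m = (as.length - m) + 1 := by
          simp only [List.length_cons]; omega
        rw [hlen]
        conv_rhs => rw [List.range_succ_eq_map (n := as.length - m)]
        simp only [List.map_cons, List.map_map]
        refine congrArg₂ List.cons ?_ ?_
        · conv_rhs => rw [List.range_succ_eq_map (n := m)]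
          simp only [List.map_cons, List.map_map, List.getD_cons_zero, Nat.zero_add]
          refine congrArg (List.cons a) ?_
          apply List.map_congr_left; intro i _
          simp [Function.comp]
        · apply List.map_congr_left; intro x _
          apply List.map_congr_left; intro i _
          have h1 : Nat.succ x + i = (x + i) + 1 := by omega
          have h2 : x + 1 + i = (x + i) + 1 := by omega
          simp [h1]
      · rw [zipGo_none a as _ (by rw [my_headsTails d m as, if_neg h])]
        have : (a :: as).length - m = 0 := by simp only [List.length_cons]; omega
        rw [this]
        simp

theorem my_zip {α : Type} (d : α) (l : List α) (m : ℕ) :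
    pvZip ((List.range (m+1)).map (fun i => l.drop i)) =
      (List.range (l.length - m)).map (fun x => (List.range (m+1)).map (fun i => l.getD (x+i) d)) := by
  conv_lhs => rw [List.range_succ_eq_map]
  simp only [List.map_cons, List.drop_zero, List.map_map]
  show pvZipGo l _ = _
  have hrest : (List.range m).map ((fun i => l.drop i) ∘ Nat.succ)
      = (List.range m).map (fun i => l.drop (i+1)) := by
    apply List.map_congr_left; intro i _; simp [Function.comp]
  rw [hrest, my_zipGo d]

-- A's inner concatenation loop builds exactly " ".join of the window
theorem my_foldA (line : List String) : ∀ (m x : ℕ),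
    (PySem.List.pyRange 0 ((m : Int) + 1) 1).foldl
        (fun str_gram i => (if i ≠ 0 then str_gram ++ " " else str_gram)
          ++ PySem.List.pyGetD line ((x : Int) + i) "") ""
      = PySem.Str.join " " ((List.range (m+1)).map (fun i => line.getD (x+i) "")) := by
  intro m
  induction m with
  | zero =>
      intro x
      rw [show ((0:ℕ) : Int) + 1 = (0:Int) + 1 from by norm_num,
        PySem.List.pyRange_one_singleton]
      simp only [List.foldl_cons, List.foldl_nil, Nat.zero_add, List.range_one,
        List.map_cons, List.map_nil]
      rw [if_neg (by simp), String.empty_append, add_zero, PySem.List.pyGetD_natCast,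
        sjoin_single]
      simp
  | succ m ih =>
      intro x
      rw [show ((m + 1 : ℕ) : Int) + 1 = ((m : Int) + 1) + 1 from by push_cast; ring,
        PySem.List.pyRange_one_succ_right (by positivity), List.foldl_append, ih x]
      simp only [List.foldl_cons, List.foldl_nil]
      rw [if_pos (by omega)]
      rw [show (x : Int) + ((m : Int) + 1) = ((x + m + 1 : ℕ) : Int) from by push_cast; ring,
        PySem.List.pyGetD_natCast]
      rw [List.range_succ (n := m + 1), List.map_append, List.map_cons, List.map_nil,
        sjoin_app _ (by simp) _]
      rw [show x + (m + 1) = x + m + 1 from by omega]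

-- both per-line computations equal the canonical window list
theorem my_lineA (line : List String) (m : ℕ) :
    (PySem.List.pyRange 0 ((line.length : Int) - ((m : Int) + 1) + 1) 1).foldl (fun f_s x =>
        f_s ++ [(PySem.List.pyRange 0 ((m : Int) + 1) 1).foldl (fun str_gram i =>
          (if i ≠ 0 then str_gram ++ " " else str_gram) ++ PySem.List.pyGetD line (x + i) "") ""]) []
      = (List.range (line.length - m)).map (fun x =>
          PySem.Str.join " " ((List.range (m+1)).map (fun i => line.getD (x+i) ""))) := by
  rw [PySem.List.foldl_append_singleton_eq_map]
  rw [show (line.length : Int) - ((m : Int) + 1) + 1 = (line.length : Int) - (m : Int) from by ring]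
  rw [PySem.List.pyRange_one 0 ((line.length : Int) - (m : Int)), List.map_map,
    show ((line.length : Int) - (m : Int) - 0).toNat = line.length - m from by omega,
    List.nil_append]
  apply List.map_congr_left; intro x _
  simp only [Function.comp, zero_add]
  exact my_foldA line m x

theorem my_lineB_core (line : List String) (m : ℕ) :
    (pvZip ((PySem.List.pyRange 0 ((m : Int) + 1) 1).map
        (fun i => PySem.List.slice line (some i) none))).map (fun t => PySem.Str.join " " t)
      = (List.range (line.length - m)).map (fun x =>
          PySem.Str.join " " ((List.range (m+1)).map (fun i => line.getD (x+i) ""))) := by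
  rw [PySem.List.pyRange_one,
    show ((m : Int) + 1 - 0).toNat = m + 1 from by omega, List.map_map]
  have hsl : (List.range (m+1)).map ((fun i => PySem.List.slice line (some i) none) ∘ (fun k : ℕ => (0 : Int) + (k : Int)))
      = (List.range (m+1)).map (fun i => line.drop i) := by
    apply List.map_congr_left; intro k _
    simp [Function.comp, PySem.List.slice_from_natCast]
  rw [hsl, my_zip "" line m, List.map_map]
  rfl

theorem my_lineB (line : List String) (m : ℕ) :
    pvGrams line ((m : Int) + 1)
      = (List.range (line.length - m)).map (fun x =>
          PySem.Str.join " " ((List.range (m+1)).map (fun i => line.getD (x+i) ""))) := by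
  unfold pvGrams
  by_cases h : (line.length : Int) < (m : Int) + 1
  · rw [if_pos h]
    have : line.length - m = 0 := by omega
    rw [this]
    rfl
  · rw [if_neg h]
    exact my_lineB_core line m

theorem per_line_eq (line : List String) (m : ℕ) :
    (PySem.List.pyRange 0 ((line.length : Int) - ((m : Int) + 1) + 1) 1).foldl (fun f_s x =>
        f_s ++ [(PySem.List.pyRange 0 ((m : Int) + 1) 1).foldl (fun str_gram i =>
          (if i ≠ 0 then str_gram ++ " " else str_gram) ++ PySem.List.pyGetD line (x + i) "") ""]) []
      = pvGrams line ((m : Int) + 1) :=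
  (my_lineA line m).trans (my_lineB line m).symm

-- ===== VERDICT (by name: the statement is the Claim_ definition above) =====
theorem n_g_t_spec : Claim_equal_n_g_t := by
  intro corpus n _ hpre
  obtain ⟨-, hn⟩ := hpre
  obtain ⟨m, rfl⟩ : ∃ m : ℕ, n = (m : Int) + 1 := ⟨(n - 1).toNat, by omega⟩
  unfold Spec_n_g_t n_g_t n_g_t_alt
  rw [PySem.List.foldl_append_singleton_eq_map, List.nil_append]
  apply List.map_congr_left; intro line _
  exact per_line_eq line m
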